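-- pv_equiv track=rewrite | github.com/johntelforduk/alexa-london-bus | bus_stop.py | buses_to_speech
-- ===== SOURCE A (Python) =====
-- def due_mins_to_words(mins:int) -> str:
--     """Convert the parm number of minutes to a due time in words."""
--     if mins == 0:
--         return 'now'
--     elif mins == 1:
--         return 'in 1 minute'
--     else:
--         return 'in ' + str(mins) + ' minutes'
--
-- def mins_to_words(mins:int) -> str:
--     """Convert the parm number of minutes into words."""
--     if mins == 0:
--         return 'zero minutes'
--     elif mins == 1:
--         return '1 minute'
--     else:
--         return str(mins) + ' minutes'
--
-- def buses_to_speech(bus_list) -> str: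
--     if bus_list is None:
--         return '<speak>Sorry, but I could not get information from' \
--                + ' <say-as interpret-as="spell-out">TFL</say-as></speak>.'
--     elif len(bus_list) == 0:
--         return '<speak>There are no buses at the moment.</speak>'
--
--     else:
--         (_, exp_arrival_mins, bus_stop_name, bus_number, towards) = bus_list.pop(0)
--
--         speech = '<speak>The next bus from ' \
--                  + bus_stop_name \
--                  + ' is the <say-as interpret-as="digits">' \
--                  + str(bus_number) \
--                  + '</say-as> towards ' \
--                  + towards \
--                  + ' due ' \
--                  + due_mins_to_words(exp_arrival_mins) \
--                  + '.'
--
--         if len(bus_list) == 0: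
--             speech = speech + ' There are no more buses expected after that.'
--
--         elif len(bus_list) == 1:
--             (_, exp_arrival_mins, _, _, _) = bus_list.pop(0)
--             speech += ' Followed by a bus in ' + mins_to_words(exp_arrival_mins) + ' from now.'
--
--         else:
--             speech += ' Followed by buses in '
--             while len(bus_list) > 0:
--                 (_, exp_arrival_mins, _, _, _) = bus_list.pop(0)
--                 if len(bus_list) == 0:
--                     speech += 'and ' + mins_to_words(exp_arrival_mins) + ' from now.'
--                 else:
--                     speech += mins_to_words(exp_arrival_mins) + ', '
--
--         speech += '</speak>'
--         return speech
-- ===== SOURCE B (Python) =====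
-- def due_mins_to_words(mins: int) -> str:
--     if mins == 0:
--         return 'now'
--     elif mins == 1:
--         return 'in 1 minute'
--     else:
--         return 'in ' + str(mins) + ' minutes'
--
--
-- def mins_to_words(mins: int) -> str:
--     if mins == 0:
--         return 'zero minutes'
--     elif mins == 1:
--         return '1 minute'
--     else:
--         return str(mins) + ' minutes'
--
--
-- def buses_to_speech(bus_list) -> str:
--     if bus_list is None:
--         return '<speak>Sorry, but I could not get information from' \
--                + ' <say-as interpret-as="spell-out">TFL</say-as></speak>.'
--     if len(bus_list) == 0:
--         return '<speak>There are no buses at the moment.</speak>'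
--
--     (_, exp_arrival_mins, bus_stop_name, bus_number, towards) = bus_list.pop(0)
--
--     opening = ('<speak>The next bus from ' + bus_stop_name
--                + ' is the <say-as interpret-as="digits">' + str(bus_number)
--                + '</say-as> towards ' + towards
--                + ' due ' + due_mins_to_words(exp_arrival_mins) + '.')
--
--     # Drain the remaining buses into their expected-arrival minutes
--     # (leaves bus_list empty, like A does).
--     mins = [bus[1] for bus in bus_list]
--     bus_list.clear()
--
--     if not mins:
--         tail = ' There are no more buses expected after that.'
--     elif len(mins) == 1:
--         tail = ' Followed by a bus in ' + mins_to_words(mins[0]) + ' from now.'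
--     else:
--         tail = (' Followed by buses in '
--                 + ''.join(mins_to_words(m) + ', ' for m in mins[:-1])
--                 + 'and ' + mins_to_words(mins[-1]) + ' from now.')
--
--     return opening + tail + '</speak>'
-- ===== Notes on version B (the rewrite author's own statement) =====
-- stated objective: simpler
-- what changed: A interleaves string building with destructive pops and an in-loop look-ahead on the shrinking list; B first extracts the remaining arrival minutes into a plain list (then clears bus_list to keep A's mutation), and builds the tail declaratively by joining per-minute phrases over all-but-last plus a final 'and ...' phrase.
import Mathlib
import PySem

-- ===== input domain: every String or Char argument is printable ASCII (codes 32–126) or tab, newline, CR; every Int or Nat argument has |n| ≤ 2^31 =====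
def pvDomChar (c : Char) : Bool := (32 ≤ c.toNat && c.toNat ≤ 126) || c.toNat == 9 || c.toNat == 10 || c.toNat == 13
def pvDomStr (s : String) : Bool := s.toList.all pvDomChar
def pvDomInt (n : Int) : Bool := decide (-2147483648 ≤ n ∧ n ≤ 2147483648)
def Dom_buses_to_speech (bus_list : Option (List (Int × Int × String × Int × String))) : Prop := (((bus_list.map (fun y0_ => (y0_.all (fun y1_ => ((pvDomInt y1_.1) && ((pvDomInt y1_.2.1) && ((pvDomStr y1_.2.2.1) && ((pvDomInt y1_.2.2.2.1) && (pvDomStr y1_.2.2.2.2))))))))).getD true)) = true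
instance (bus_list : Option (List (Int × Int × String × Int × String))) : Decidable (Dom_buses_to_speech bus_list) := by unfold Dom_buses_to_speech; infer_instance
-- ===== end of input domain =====

-- B replaces A's destructive pop-and-look-ahead string loop by extracting the remaining
-- arrival minutes into a list and joining per-minute phrases (objective: simpler).
-- Note: both A and B empty the passed-in list in place; the theorems are about the return value.


-- ===== PORT A =====
-- shared module helpers (identical in Source A and Source B)
def pv_due_mins_to_words (mins : Int) : String :=
  if mins = 0 then "now"
  else if mins = 1 then "in 1 minute"
  else "in " ++ PySem.Int.toStr mins ++ " minutes"

def pv_mins_to_words (mins : Int) : String :=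
  if mins = 0 then "zero minutes"
  else if mins = 1 then "1 minute"
  else PySem.Int.toStr mins ++ " minutes"

-- A's `while len(bus_list) > 0` loop: pop the head, look ahead at the shrunken list
def pvA_loop : List (Int × Int × String × Int × String) → String → String
  | [], speech => speech
  | (_, m, _, _, _) :: rest, speech =>
      if rest.length = 0 then speech ++ ("and " ++ pv_mins_to_words m ++ " from now.")
      else pvA_loop rest (speech ++ (pv_mins_to_words m ++ ", "))

def buses_to_speech (bus_list : Option (List (Int × Int × String × Int × String))) : String :=
  match bus_list with
  | none => "<speak>Sorry, but I could not get information from <say-as interpret-as=\"spell-out\">TFL</say-as></speak>."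
  | some [] => "<speak>There are no buses at the moment.</speak>"
  | some ((_, exp_arrival_mins, bus_stop_name, bus_number, towards) :: rest) =>
      let speech := "<speak>The next bus from " ++ bus_stop_name
        ++ " is the <say-as interpret-as=\"digits\">" ++ PySem.Int.toStr bus_number
        ++ "</say-as> towards " ++ towards
        ++ " due " ++ pv_due_mins_to_words exp_arrival_mins ++ "."
      let speech :=
        match rest with
        | [] => speech ++ " There are no more buses expected after that."
        | [(_, m2, _, _, _)] =>
            speech ++ (" Followed by a bus in " ++ pv_mins_to_words m2 ++ " from now.")
        | _ => pvA_loop rest (speech ++ " Followed by buses in ")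
      speech ++ "</speak>"

-- ===== PORT B =====
def buses_to_speech_alt (bus_list : Option (List (Int × Int × String × Int × String))) : String :=
  match bus_list with
  | none => "<speak>Sorry, but I could not get information from <say-as interpret-as=\"spell-out\">TFL</say-as></speak>."
  | some [] => "<speak>There are no buses at the moment.</speak>"
  | some ((_, exp_arrival_mins, bus_stop_name, bus_number, towards) :: rest) =>
      let opening := "<speak>The next bus from " ++ bus_stop_name
        ++ " is the <say-as interpret-as=\"digits\">" ++ PySem.Int.toStr bus_number
        ++ "</say-as> towards " ++ towards
        ++ " due " ++ pv_due_mins_to_words exp_arrival_mins ++ "."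
      let mins := rest.map (fun bus => bus.2.1)
      let tail :=
        if mins.isEmpty then " There are no more buses expected after that."
        else if mins.length = 1 then
          " Followed by a bus in " ++ pv_mins_to_words (mins.headD 0) ++ " from now."
        else
          " Followed by buses in "
            ++ String.join (mins.dropLast.map (fun m => pv_mins_to_words m ++ ", "))
            ++ "and " ++ pv_mins_to_words mins.getLast! ++ " from now."
      opening ++ tail ++ "</speak>"

-- ===== PRECONDITION & SPEC =====
def Spec_buses_to_speech (bus_list : Option (List (Int × Int × String × Int × String))) (out : String) : Prop := out = buses_to_speech_alt bus_list
instance (bus_list : Option (List (Int × Int × String × Int × String))) (out : String) : Decidable (Spec_buses_to_speech bus_list out) := by unfold Spec_buses_to_speech; infer_instance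

-- ===== CLAIM (what is proved, stated in full; the proofs are below) =====
def Claim_equal_buses_to_speech : Prop := ∀ (bus_list : Option (List (Int × Int × String × Int × String))), Dom_buses_to_speech bus_list → Spec_buses_to_speech bus_list (buses_to_speech bus_list)

-- ===== LEMMAS AND PROOFS =====

-- String.join with a non-empty initial segment (folds with a non-empty accumulator).
theorem pv_foldl_append (l : List String) :
    ∀ a : String, l.foldl (fun r s => r ++ s) a = a ++ l.foldl (fun r s => r ++ s) "" := by
  induction l with
  | nil => intro a; simp
  | cons y t ih =>
      intro a
      simp only [List.foldl_cons]
      rw [ih (a ++ y), ih ("" ++ y)]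
      simp [String.append_assoc]

theorem pv_join_cons (x : String) (l : List String) :
    String.join (x :: l) = x ++ String.join l := by
  simp only [String.join, List.foldl_cons]
  rw [pv_foldl_append l ("" ++ x)]
  simp

-- A's loop over a nonempty list produces the joined comma-phrases of all but the last
-- minute followed by the closing "and ... from now." phrase.
theorem pvA_loop_eq (l : List (Int × Int × String × Int × String)) (h : l ≠ []) :
    ∀ s : String,
      pvA_loop l s
        = s ++ (String.join ((l.map (fun bus => bus.2.1)).dropLast.map
                  (fun m => pv_mins_to_words m ++ ", "))
            ++ ("and " ++ pv_mins_to_words (l.map (fun bus => bus.2.1)).getLast! ++ " from now.")) := by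
  induction l with
  | nil => exact absurd rfl h
  | cons x t ih =>
      intro s
      match t with
      | [] =>
          obtain ⟨_, m, _, _, _⟩ := x
          simp [pvA_loop, String.join]
      | y :: u =>
          obtain ⟨_, m, _, _, _⟩ := x
          rw [pvA_loop, if_neg (by simp)]
          rw [ih (List.cons_ne_nil y u) (s ++ (pv_mins_to_words m ++ ", "))]
          simp only [List.map_cons, List.dropLast_cons₂, pv_join_cons, List.getLast!_eq_getLast?_getD,
            List.getLast?_cons_cons]
          simp [String.append_assoc]

theorem buses_to_speech_spec' (bus_list : Option (List (Int × Int × String × Int × String))) :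
    buses_to_speech bus_list = buses_to_speech_alt bus_list := by
  match bus_list with
  | none => rfl
  | some [] => rfl
  | some ((_, m0, name, num, tw) :: rest) =>
      match rest with
      | [] => rfl
      | [(_, m2, _, _, _)] =>
          simp [buses_to_speech, buses_to_speech_alt, String.append_assoc]
      | a :: b :: u =>
          simp only [buses_to_speech, buses_to_speech_alt]
          rw [pvA_loop_eq (a :: b :: u) (List.cons_ne_nil _ _)]
          rw [if_neg (by simp), if_neg (by simp)]
          simp only [← String.append_assoc]

-- ===== VERDICT (by name: the statement is the Claim_ definition above) =====
theorem buses_to_speech_spec : Claim_equal_buses_to_speech := by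
  intro bus_list _
  exact buses_to_speech_spec' bus_list
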